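-- pv_equiv track=rewrite | github.com/AthomsG/LFEA | High Harmonic Generation/Notebooks/PIL_Functions.py | soma_linhas
-- ===== SOURCE A (Python) =====
-- def soma_linhas(pixels, orientation='x'):
--     height = len(pixels)
--     width  = len(pixels[0])
--
--     if orientation=='x':
--         soma = list()
--         for i in range(width):
--             soma += [0]
--         for i in range(height):
--             for j in range(width):
--                 soma[j] += pixels[i][j]
--         return soma
--     else:
--         soma = list()
--         for i in range(height):
--             soma += [0]
--         for i in range(width):
--             for j in range(height):
--                 soma[j] += pixels[j][i]
--         return soma
-- ===== SOURCE B (Python) =====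
-- def soma_linhas(pixels, orientation='x'):
--     width = len(pixels[0])
--     if orientation == 'x':
--         return [sum(row[j] for row in pixels) for j in range(width)]
--     return [sum(row[j] for j in range(width)) for row in pixels]
-- ===== Notes on version B (the rewrite author's own statement) =====
-- stated objective: idiomatic
-- what changed: B replaces A's preallocated zero accumulator updated in place by nested index loops with direct per-output-element comprehensions in the opposite traversal order: for 'x' each column sum is computed whole (outer loop over columns, A accumulates row-major), for the else branch each row sum is computed whole (outer loop over rows, A accumulates column-major). (sum over a generator per output element; measured constant-factor speedup, same asymptotics).
import Mathlib
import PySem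

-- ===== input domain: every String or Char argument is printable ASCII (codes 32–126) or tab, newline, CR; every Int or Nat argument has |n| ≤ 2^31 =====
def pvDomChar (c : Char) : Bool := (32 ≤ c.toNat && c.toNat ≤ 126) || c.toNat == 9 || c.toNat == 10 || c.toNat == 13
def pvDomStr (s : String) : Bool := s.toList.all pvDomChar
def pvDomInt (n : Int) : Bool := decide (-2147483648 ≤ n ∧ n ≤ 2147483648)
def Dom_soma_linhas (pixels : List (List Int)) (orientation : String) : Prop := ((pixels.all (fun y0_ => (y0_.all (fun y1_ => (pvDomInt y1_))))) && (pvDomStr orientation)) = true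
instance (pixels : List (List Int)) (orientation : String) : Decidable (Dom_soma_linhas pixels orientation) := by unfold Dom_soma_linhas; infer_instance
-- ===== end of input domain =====

-- B replaces A's preallocated in-place accumulator and nested index loops with direct per-output comprehensions in the opposite traversal order (whole-column sums for 'x', whole-row sums otherwise); same cost, more idiomatic.


-- ===== PORT A =====
-- 'pixels[0]' is ported totally as 'pixels.headD []': exact under Pre_ (pixels ≠ []); the pyGetD/pySetD
-- defaults are exact under Pre_ (every row at least as long as the first), where every index A uses is in range.
def soma_linhas (pixels : List (List Int)) (orientation : String) : List Int :=
  let height : Int := pixels.length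
  let width : Int := (pixels.headD []).length
  if orientation = "x" then
    let soma := (PySem.List.pyRange 0 width 1).foldl (fun s _ => s ++ [(0 : Int)]) []
    (PySem.List.pyRange 0 height 1).foldl (fun s i =>
      (PySem.List.pyRange 0 width 1).foldl (fun t j =>
        PySem.List.pySetD t j (PySem.List.pyGetD t j 0 +
          PySem.List.pyGetD (PySem.List.pyGetD pixels i []) j 0)) s) soma
  else
    let soma := (PySem.List.pyRange 0 height 1).foldl (fun s _ => s ++ [(0 : Int)]) []
    (PySem.List.pyRange 0 width 1).foldl (fun s i =>
      (PySem.List.pyRange 0 height 1).foldl (fun t j =>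
        PySem.List.pySetD t j (PySem.List.pyGetD t j 0 +
          PySem.List.pyGetD (PySem.List.pyGetD pixels j []) i 0)) s) soma

-- ===== PORT B =====
-- 'pixels[0]' ported totally as 'pixels.headD []'; 'row[j]' as pyGetD (exact under Pre_, where every index
-- B uses is in range; outside Pre_ both Pythons raise IndexError on the same inputs).
def soma_linhas_alt (pixels : List (List Int)) (orientation : String) : List Int :=
  let width : Int := (pixels.headD []).length
  if orientation = "x" then
    (PySem.List.pyRange 0 width 1).map (fun j =>
      (pixels.map (fun row => PySem.List.pyGetD row j 0)).sum)
  else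
    pixels.map (fun row =>
      ((PySem.List.pyRange 0 width 1).map (fun j => PySem.List.pyGetD row j 0)).sum)

-- ===== PRECONDITION & SPEC =====
-- Pre_ is exactly where A returns: pixels nonempty (else len(pixels[0]) raises IndexError) and no row
-- shorter than the first (else indexing a row at a first-row index raises IndexError) — B raises on
-- exactly the same inputs.
def Pre_soma_linhas (pixels : List (List Int)) (orientation : String) : Prop :=
  pixels ≠ [] ∧ ∀ r ∈ pixels, (pixels.headD []).length ≤ r.length
instance (pixels : List (List Int)) (orientation : String) : Decidable (Pre_soma_linhas pixels orientation) := by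
  unfold Pre_soma_linhas; infer_instance

def pvWitness_soma_linhas : List (List Int) × String := ([[1, 2], [3, 4]], "x")

def Spec_soma_linhas (pixels : List (List Int)) (orientation : String) (out : List Int) : Prop := out = soma_linhas_alt pixels orientation
instance (pixels : List (List Int)) (orientation : String) (out : List Int) : Decidable (Spec_soma_linhas pixels orientation out) := by unfold Spec_soma_linhas; infer_instance

-- ===== CLAIM (what is proved, stated in full; the proofs are below) =====
def Claim_equal_soma_linhas : Prop := ∀ (pixels : List (List Int)) (orientation : String), Dom_soma_linhas pixels orientation → Pre_soma_linhas pixels orientation → Spec_soma_linhas pixels orientation (soma_linhas pixels orientation)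

-- ===== LEMMAS AND PROOFS =====

-- the 'soma += [0]' loop builds the zero list
lemma foldl_append_zero {α : Type} : ∀ (l : List α) (s : List Int),
    l.foldl (fun s _ => s ++ [(0 : Int)]) s = s ++ List.replicate l.length 0 := by
  intro l
  induction l with
  | nil => intro s; simp
  | cons a t ih => intro s; rw [List.foldl_cons, ih]; simp [List.replicate_succ]

lemma init_replicate (n : Nat) :
    (PySem.List.pyRange 0 (n : Int) 1).foldl (fun s _ => s ++ [(0 : Int)]) [] = List.replicate n 0 := by
  rw [foldl_append_zero]
  simp [PySem.List.pyRange_zero_nat]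

-- loops over range(n) with an Int index are loops over List.range n
lemma foldl_pyRange_nat {β : Type} (n : Nat) (g : β → Int → β) (init : β) :
    (PySem.List.pyRange 0 (n : Int) 1).foldl g init
      = (List.range n).foldl (fun s (k : Nat) => g s (k : Int)) init := by
  rw [PySem.List.pyRange_zero_nat, List.foldl_map]

-- (range l.length).map (fun j => l.getD j d) = l
lemma mapRange_getD {α : Type} (l : List α) (d : α) :
    (List.range l.length).map (fun j => l.getD j d) = l := by
  induction l with
  | nil => rfl
  | cons a t ih =>
    rw [List.length_cons, List.range_succ_eq_map, List.map_cons, List.map_map]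
    simpa using ih

-- the inner 'soma[j] += f j' loop is a pointwise add
lemma foldl_set_eq_zipWith (f : Nat → Int) : ∀ (s : List Int),
    (List.range s.length).foldl (fun t j => t.set j (t.getD j 0 + f j)) s
      = List.zipWith (· + ·) s ((List.range s.length).map f) := by
  intro s
  induction s generalizing f with
  | nil => rfl
  | cons a t ih =>
    rw [List.length_cons, List.range_succ_eq_map, List.foldl_cons, List.foldl_map]
    have hset : (a :: t).set 0 ((a :: t).getD 0 0 + f 0) = (a + f 0) :: t := by simp
    rw [hset]
    have hhom : (List.range t.length).foldl
        (fun s (j : Nat) => s.set (Nat.succ j) (s.getD (Nat.succ j) 0 + f (Nat.succ j)))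
        ((a + f 0) :: t)
        = (a + f 0) :: (List.range t.length).foldl
            (fun s j => s.set j (s.getD j 0 + f (j + 1))) t := by
      refine List.foldl_hom (fun l => (a + f 0) :: l) ?_
      intro x y
      simp [Nat.succ_eq_add_one]
    rw [hhom, ih (fun j => f (j + 1))]
    simp [List.map_map, Function.comp_def]

-- zipWith against an index read of a long-enough list is zipWith against the list itself
lemma zipWith_trunc : ∀ (s r : List Int), s.length ≤ r.length →
    List.zipWith (· + ·) s ((List.range s.length).map (fun j => r.getD j 0))
      = List.zipWith (· + ·) s r := by
  intro s
  induction s with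
  | nil => intro r _; rfl
  | cons a t ih =>
    intro r hlen
    cases r with
    | nil => simp at hlen
    | cons b rr =>
      rw [List.length_cons, List.range_succ_eq_map, List.map_cons, List.map_map]
      simp only [List.getD_cons_zero, List.zipWith_cons_cons]
      rw [show ((fun j => (b :: rr).getD j 0) ∘ Nat.succ) = fun j => rr.getD j 0 from rfl]
      rw [ih rr (by simpa using hlen)]

-- fold congruence under a state invariant (with membership of the index)
lemma foldl_invariant_congr {α β : Type} {P : β → Prop} (g g' : β → α → β) :
    ∀ (idx : List α), (∀ s i, i ∈ idx → P s → g s i = g' s i ∧ P (g' s i)) →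
      ∀ (s : β), P s → idx.foldl g s = idx.foldl g' s := by
  intro idx
  induction idx with
  | nil => intro _ s _; rfl
  | cons i idx ih =>
    intro hstep s hs
    obtain ⟨heq, hP⟩ := hstep s i List.mem_cons_self hs
    rw [List.foldl_cons, List.foldl_cons, heq,
      ih (fun s j hj hPs => hstep s j (List.mem_cons_of_mem _ hj) hPs) _ hP]

-- zipWith over two maps of the same list
lemma zipWith_map_same {α : Type} (f : Int → Int → Int) (g h : α → Int) (l : List α) :
    List.zipWith f (l.map g) (l.map h) = l.map (fun x => f (g x) (h x)) := by
  rw [List.zipWith_map, List.zipWith_self]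

-- column-major accumulation = per-row prefix sums
lemma yfold (rows : List (List Int)) :
    ∀ (w : Nat), (∀ r ∈ rows, w ≤ r.length) →
      (List.range w).foldl (fun s i => List.zipWith (· + ·) s (rows.map (fun r => r.getD i 0)))
          (List.replicate rows.length 0)
        = rows.map (fun r => (r.take w).sum) := by
  intro w
  induction w with
  | zero => intro _; simp
  | succ w ih =>
    intro hw
    rw [List.range_succ, List.foldl_append, List.foldl_cons, List.foldl_nil,
      ih (fun r hr => le_trans (Nat.le_succ w) (hw r hr)), zipWith_map_same]
    refine List.map_congr_left ?_
    intro r hr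
    have hlt : w < r.length := hw r hr
    rw [List.getD_eq_getElem r 0 hlt, List.sum_take_succ r w hlt]

-- indexing a list over range(len) is mapping / folding the list itself
lemma mapRange_getD_map {α β : Type} (l : List α) (d : α) (f : α → β) :
    (List.range l.length).map (fun j => f (l.getD j d)) = l.map f := by
  conv_rhs => rw [← mapRange_getD l d]
  rw [List.map_map]
  rfl

lemma foldlRange_getD {α β : Type} (l : List α) (d : α) (g : β → α → β) (init : β) :
    (List.range l.length).foldl (fun s j => g s (l.getD j d)) init = l.foldl g init := by
  conv_rhs => rw [← mapRange_getD l d]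
  rw [List.foldl_map]

-- reading the first w entries of a long-enough row is taking its prefix
lemma mapRange_getD_take (r : List Int) : ∀ (w : Nat), w ≤ r.length →
    (List.range w).map (fun j => r.getD j 0) = r.take w := by
  intro w
  induction w with
  | zero => intro _; simp
  | succ w ih =>
    intro hw
    rw [List.range_succ, List.map_append, ih (by omega), List.map_cons, List.map_nil,
      List.getD_eq_getElem r 0 (by omega), List.take_succ_eq_append_getElem (by omega)]

-- row-major zipWith accumulation from zeros = the list of column sums
lemma xfold_cols : ∀ (rows : List (List Int)) (s : List Int),
    (∀ r ∈ rows, s.length ≤ r.length) →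
      rows.foldl (fun t r => List.zipWith (· + ·) t r) s
        = (List.range s.length).map
            (fun j => s.getD j 0 + (rows.map (fun r => r.getD j 0)).sum) := by
  intro rows
  induction rows with
  | nil =>
    intro s _
    simp only [List.foldl_nil, List.map_nil, List.sum_nil, add_zero]
    exact (mapRange_getD s 0).symm
  | cons r rs ih =>
    intro s hlen
    have hrl : s.length ≤ r.length := hlen r List.mem_cons_self
    have hzl : (List.zipWith (· + ·) s r).length = s.length := by
      rw [List.length_zipWith]; omega
    rw [List.foldl_cons, ih (List.zipWith (· + ·) s r)
      (fun r' hr' => hzl ▸ hlen r' (List.mem_cons_of_mem _ hr')), hzl]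
    refine List.map_congr_left ?_
    intro j hj
    have hjs : j < s.length := List.mem_range.mp hj
    rw [List.getD_eq_getElem _ 0 (by omega : j < (List.zipWith (· + ·) s r).length)]
    rw [List.getElem_zipWith, ← List.getD_eq_getElem s 0 hjs,
      ← List.getD_eq_getElem r 0 (by omega)]
    simp [add_assoc]

-- ===== VERDICT (by name: the statement is the Claim_ definition above) =====
theorem soma_linhas_spec : Claim_equal_soma_linhas := by
  intro pixels orientation _ hpre
  obtain ⟨hne, hw⟩ := hpre
  unfold Spec_soma_linhas soma_linhas soma_linhas_alt
  by_cases hx : orientation = "x"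
  · simp only [hx, if_pos]
    rw [init_replicate, foldl_pyRange_nat, PySem.List.pyRange_zero_nat, List.map_map]
    simp only [List.foldl_map, PySem.List.pySetD_natCast, PySem.List.pyGetD_natCast,
      Function.comp_def]
    -- each pass of A's outer loop adds row i pointwise (zip truncation is invisible: |s| ≤ |row i|)
    rw [foldl_invariant_congr
      (P := fun s : List Int => s.length = (pixels.headD []).length)
      (fun s (i : Nat) => (List.range (pixels.headD []).length).foldl
        (fun t j => t.set j (t.getD j 0 + (pixels.getD i []).getD j 0)) s)
      (fun s (i : Nat) => List.zipWith (· + ·) s (pixels.getD i []))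
      (List.range pixels.length)
      (by
        intro s i hi hs
        have hrow : pixels.getD i [] ∈ pixels := by
          rw [List.getD_eq_getElem pixels [] (List.mem_range.mp hi)]
          exact List.getElem_mem _
        have hlen : s.length ≤ (pixels.getD i []).length := hs ▸ hw _ hrow
        dsimp only
        constructor
        · rw [← hs, foldl_set_eq_zipWith, zipWith_trunc s _ hlen]
        · rw [List.length_zipWith]
          omega)
      (List.replicate (pixels.headD []).length 0) (by simp)]
    rw [foldlRange_getD pixels ([] : List Int)
      (fun t r => List.zipWith (· + ·) t r) (List.replicate (pixels.headD []).length 0)]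
    rw [xfold_cols pixels _ (by simpa using hw)]
    simp
  · simp only [hx, if_false]
    rw [init_replicate, foldl_pyRange_nat]
    simp only [foldl_pyRange_nat, PySem.List.pySetD_natCast, PySem.List.pyGetD_natCast]
    -- each pass of A's outer loop adds column i pointwise (the inner loop runs over all rows)
    rw [foldl_invariant_congr
      (P := fun s : List Int => s.length = pixels.length)
      (fun s (i : Nat) => (List.range pixels.length).foldl
        (fun t j => t.set j (t.getD j 0 + (pixels.getD j []).getD i 0)) s)
      (fun s (i : Nat) => List.zipWith (· + ·) s
        ((List.range pixels.length).map (fun j => (pixels.getD j []).getD i 0)))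
      (List.range (pixels.headD []).length)
      (by
        intro s i _ hs
        dsimp only
        constructor
        · rw [← hs]; exact foldl_set_eq_zipWith _ s
        · simp [List.length_zipWith, hs])
      (List.replicate pixels.length 0) (by simp)]
    have hcol : ∀ (i : Nat), (List.range pixels.length).map (fun j => (pixels.getD j []).getD i 0)
        = pixels.map (fun r => r.getD i 0) := fun i => by
      exact mapRange_getD_map pixels [] (fun r => r.getD i 0)
    simp only [hcol]
    rw [yfold pixels _ hw]
    refine List.map_congr_left ?_
    intro r hr
    rw [PySem.List.pyRange_zero_nat, List.map_map]
    simp only [Function.comp_def, PySem.List.pyGetD_natCast]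
    rw [mapRange_getD_take r _ (hw r hr)]
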